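-- pv_equiv track=rewrite | github.com/keithxun/leetcode | 2840. Check if Strings Can be Made Equal With Operations II/keith.py | checkStrings
-- ===== SOURCE A (Python) =====
-- def checkStrings(s1: str, s2: str) -> bool:
--     odd_map = {}
--     even_map = {}
--
--     for index, c in enumerate(s1):
--         if index % 2 == 0:
--             even_map[c] = even_map.get(c, 0) + 1
--         else:
--             odd_map[c] = odd_map.get(c, 0) + 1
--
--     for index, c in enumerate(s2):
--         if index % 2 == 0:
--             even_map[c] = even_map.get(c, 0) - 1
--         else:
--             odd_map[c] = odd_map.get(c, 0) - 1
--
--     return all(count == 0 for count in even_map.values()) and \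
--            all(count == 0 for count in odd_map.values())
-- ===== SOURCE B (Python) =====
-- def checkStrings(s1: str, s2: str) -> bool:
--     return sorted(s1[::2]) == sorted(s2[::2]) and sorted(s1[1::2]) == sorted(s2[1::2])
-- ===== Notes on version B (the rewrite author's own statement) =====
-- stated objective: simpler
-- what changed: Replaces the two hand-maintained frequency dictionaries (increment over s1, decrement over s2, then an all-zero scan) with slicing each string into its even- and odd-index subsequences and comparing their sorted forms.
import Mathlib
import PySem

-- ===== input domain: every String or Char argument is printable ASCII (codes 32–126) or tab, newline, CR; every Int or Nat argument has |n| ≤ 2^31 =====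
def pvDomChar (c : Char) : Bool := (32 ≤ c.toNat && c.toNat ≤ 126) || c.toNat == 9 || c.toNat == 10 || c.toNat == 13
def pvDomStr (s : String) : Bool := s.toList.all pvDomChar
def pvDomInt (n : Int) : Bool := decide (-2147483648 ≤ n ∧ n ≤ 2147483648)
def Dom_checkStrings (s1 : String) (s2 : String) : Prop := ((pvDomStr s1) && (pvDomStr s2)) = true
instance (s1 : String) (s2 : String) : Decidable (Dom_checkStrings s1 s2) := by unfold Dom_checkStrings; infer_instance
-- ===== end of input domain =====

-- B replaces A's two frequency dictionaries by sorting each string's even- and odd-index slices and comparing them (simpler, not faster).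

-- ===== PORT A =====
-- A keeps two dicts and updates one of them per enumerated character; state = (odd_map, even_map), in Python's declaration order.
def checkStrings (s1 : String) (s2 : String) : Bool :=
  let st1 := (PySem.List.enumerate s1.toList 0).foldl
    (fun (st : PySem.Dict Char Int × PySem.Dict Char Int) ic =>
      if PySem.Int.mod ic.1 2 == 0 then (st.1, st.2.insert ic.2 (st.2.getD ic.2 0 + 1))
      else (st.1.insert ic.2 (st.1.getD ic.2 0 + 1), st.2))
    (PySem.Dict.empty, PySem.Dict.empty)
  let st2 := (PySem.List.enumerate s2.toList 0).foldl
    (fun (st : PySem.Dict Char Int × PySem.Dict Char Int) ic =>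
      if PySem.Int.mod ic.1 2 == 0 then (st.1, st.2.insert ic.2 (st.2.getD ic.2 0 - 1))
      else (st.1.insert ic.2 (st.1.getD ic.2 0 - 1), st.2))
    st1
  (st2.2.values.all (fun count => count == 0)) && (st2.1.values.all (fun count => count == 0))

-- ===== PORT B =====
-- B: sorted(s1[::2]) == sorted(s2[::2]) and sorted(s1[1::2]) == sorted(s2[1::2]);
-- a step-2 slice never raises, so the .getD [] branch is never taken.
def checkStrings_alt (s1 : String) (s2 : String) : Bool :=
  (PySem.List.sorted ((PySem.List.slice? s1.toList none none 2).getD []) (fun x => x)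
     == PySem.List.sorted ((PySem.List.slice? s2.toList none none 2).getD []) (fun x => x))
  && (PySem.List.sorted ((PySem.List.slice? s1.toList (some 1) none 2).getD []) (fun x => x)
     == PySem.List.sorted ((PySem.List.slice? s2.toList (some 1) none 2).getD []) (fun x => x))

-- ===== PRECONDITION & SPEC =====
def Spec_checkStrings (s1 : String) (s2 : String) (out : Bool) : Prop := out = checkStrings_alt s1 s2
instance (s1 : String) (s2 : String) (out : Bool) : Decidable (Spec_checkStrings s1 s2 out) := by unfold Spec_checkStrings; infer_instance

-- ===== CLAIM (what is proved, stated in full; the proofs are below) =====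
def Claim_equal_checkStrings : Prop := ∀ (s1 : String) (s2 : String), Dom_checkStrings s1 s2 → Spec_checkStrings s1 s2 (checkStrings s1 s2)

-- ===== LEMMAS AND PROOFS =====

-- the even-index and odd-index subsequences of a list
mutual
def pvEvens {α : Type} : List α → List α
  | [] => []
  | a :: t => a :: pvOdds t
def pvOdds {α : Type} : List α → List α
  | [] => []
  | _ :: t => pvEvens t
end

-- parity of the successor index
theorem pvModSucc (s : Int) :
    PySem.Int.mod (s+1) 2 = if PySem.Int.mod s 2 = 0 then 1 else 0 := by
  rw [PySem.Int.mod_eq_emod_of_pos (by norm_num : (0:Int) < 2),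
      PySem.Int.mod_eq_emod_of_pos (by norm_num : (0:Int) < 2)]
  omega

-- the parity-filtered enumerate projections are exactly pvEvens / pvOdds
theorem pvFilterEnum {α : Type} (l : List α) (s : Int) :
    ((PySem.List.enumerate l s).filter (fun p => PySem.Int.mod p.1 2 == 0)).map Prod.snd
      = (if PySem.Int.mod s 2 = 0 then pvEvens l else pvOdds l) ∧
    ((PySem.List.enumerate l s).filter (fun p => !(PySem.Int.mod p.1 2 == 0))).map Prod.snd
      = (if PySem.Int.mod s 2 = 0 then pvOdds l else pvEvens l) := by
  induction l generalizing s with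
  | nil => simp [PySem.List.enumerate_nil, pvEvens, pvOdds]
  | cons a t ih =>
    obtain ⟨ih1, ih2⟩ := ih (s+1)
    rw [pvModSucc] at ih1 ih2
    by_cases h : PySem.Int.mod s 2 = 0 <;>
      simp_all [PySem.List.enumerate_cons, pvEvens, pvOdds]

-- A's single loop over (index, char) pairs is two independent dict loops (+1 version)
theorem pvFoldSplitP (l : List (Int × Char)) (om em : PySem.Dict Char Int) :
    l.foldl
      (fun (st : PySem.Dict Char Int × PySem.Dict Char Int) ic =>
        if PySem.Int.mod ic.1 2 == 0 then (st.1, st.2.insert ic.2 (st.2.getD ic.2 0 + 1))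
        else (st.1.insert ic.2 (st.1.getD ic.2 0 + 1), st.2))
      (om, em)
    = (((l.filter (fun p => !(PySem.Int.mod p.1 2 == 0))).map Prod.snd).foldl
         (fun d c => d.insert c (d.getD c 0 + 1)) om,
       ((l.filter (fun p => PySem.Int.mod p.1 2 == 0)).map Prod.snd).foldl
         (fun d c => d.insert c (d.getD c 0 + 1)) em) := by
  induction l generalizing om em with
  | nil => simp
  | cons a t ih =>
    by_cases h : (PySem.Int.mod a.1 2 == 0) = true
    · simp only [List.foldl_cons, List.filter_cons, h, if_true, Bool.not_true,
        Bool.false_eq_true, if_false, List.map_cons, ih, List.foldl_cons]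
    · have h' : (PySem.Int.mod a.1 2 == 0) = false := by simpa using h
      simp only [List.foldl_cons, List.filter_cons, h', Bool.not_false, Bool.false_eq_true,
        if_false, if_true, List.map_cons, ih, List.foldl_cons]

-- the same for the −1 loop
theorem pvFoldSplitM (l : List (Int × Char)) (om em : PySem.Dict Char Int) :
    l.foldl
      (fun (st : PySem.Dict Char Int × PySem.Dict Char Int) ic =>
        if PySem.Int.mod ic.1 2 == 0 then (st.1, st.2.insert ic.2 (st.2.getD ic.2 0 - 1))
        else (st.1.insert ic.2 (st.1.getD ic.2 0 - 1), st.2))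
      (om, em)
    = (((l.filter (fun p => !(PySem.Int.mod p.1 2 == 0))).map Prod.snd).foldl
         (fun d c => d.insert c (d.getD c 0 - 1)) om,
       ((l.filter (fun p => PySem.Int.mod p.1 2 == 0)).map Prod.snd).foldl
         (fun d c => d.insert c (d.getD c 0 - 1)) em) := by
  induction l generalizing om em with
  | nil => simp
  | cons a t ih =>
    by_cases h : (PySem.Int.mod a.1 2 == 0) = true
    · simp only [List.foldl_cons, List.filter_cons, h, if_true, Bool.not_true,
        Bool.false_eq_true, if_false, List.map_cons, ih, List.foldl_cons]
    · have h' : (PySem.Int.mod a.1 2 == 0) = false := by simpa using h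
      simp only [List.foldl_cons, List.filter_cons, h', Bool.not_false, Bool.false_eq_true,
        if_false, if_true, List.map_cons, ih, List.foldl_cons]

-- getD after the decrement loop
theorem pvGetDSub (l : List Char) (d : PySem.Dict Char Int) (v : Char) :
    (l.foldl (fun d c => d.insert c (d.getD c 0 - 1)) d).getD v 0
      = d.getD v 0 - l.count v := by
  induction l generalizing d with
  | nil => simp
  | cons a t ih =>
    rw [List.foldl_cons, ih, PySem.Dict.getD_insert, List.count_cons]
    by_cases h : v = a
    · simp [h]; ring
    · simp [h, Ne.symm h]

-- A's all-zero test on the (+1 over E1, then −1 over E2) counter = count agreement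
theorem pvAllZero (E1 E2 : List Char) :
    ((E2.foldl (fun d c => d.insert c (d.getD c 0 - 1))
       (E1.foldl (fun d c => d.insert c (d.getD c 0 + 1)) (PySem.Dict.empty : PySem.Dict Char Int))).values.all
      (fun count => count == 0)) = true ↔ ∀ c, E1.count c = E2.count c := by
  set d1 := E1.foldl (fun d c => d.insert c (d.getD c 0 + 1)) (PySem.Dict.empty : PySem.Dict Char Int) with hd1
  set d2 := E2.foldl (fun d c => d.insert c (d.getD c 0 - 1)) d1 with hd2
  have hn1 : d1.keys.Nodup := by
    rw [hd1]
    exact PySem.Dict.nodup_keys_foldl_insert E1 (fun d x => d.getD x 0 + 1) _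
      PySem.Dict.nodup_keys_empty
  have hn2 : d2.keys.Nodup := by
    rw [hd2]
    exact PySem.Dict.nodup_keys_foldl_insert E2 (fun d x => d.getD x 0 - 1) _ hn1
  have hget : ∀ c, d2.getD c 0 = (E1.count c : Int) - E2.count c := by
    intro c
    rw [hd2, pvGetDSub, hd1, PySem.Dict.getD_foldl_insert_add_one]
    simp
  have hkeys : ∀ c, c ∈ d2.keys ↔ c ∈ E1 ∨ c ∈ E2 := by
    intro c
    rw [hd2, PySem.Dict.keys_foldl_insert, PySem.Set.mem_update, hd1,
        PySem.Dict.keys_foldl_insert, PySem.Set.mem_update]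
    simp [PySem.Dict.keys_empty]
  rw [PySem.Dict.values_eq_map_keys d2 hn2 0, List.all_map, List.all_eq_true]
  constructor
  · intro h c
    by_cases hc : c ∈ E1 ∨ c ∈ E2
    · have := h c ((hkeys c).mpr hc)
      simp only [Function.comp, beq_iff_eq, hget c] at this
      omega
    · push_neg at hc
      rw [List.count_eq_zero_of_not_mem hc.1, List.count_eq_zero_of_not_mem hc.2]
  · intro h c _
    simp only [Function.comp, beq_iff_eq, hget c]
    have := h c
    omega

-- filterMap characterizations of the parity subsequences
theorem pvFMEvens {α : Type} : (l : List α) →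
    List.filterMap (fun k => l[2*k]?) (List.range ((l.length+1)/2)) = pvEvens l
  | [] => by simp [pvEvens]
  | [a] => by simp [pvEvens, pvOdds, List.range_succ]
  | a :: b :: t => by
    have ih := pvFMEvens t
    have hc : ((a :: b :: t).length + 1)/2 = ((t.length+1)/2)+1 := by
      simp only [List.length_cons]; omega
    rw [hc, List.range_succ_eq_map, List.filterMap_cons, List.filterMap_map]
    have hf : ((fun k => (a :: b :: t)[2*k]?) ∘ (fun i => i + 1)) = fun k => t[2*k]? := by
      funext k
      have h2 : 2*(k+1) = (2*k+1)+1 := by omega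
      simp [Function.comp, h2]
    simp only [Nat.mul_zero, List.getElem?_cons_zero, hf, ih, pvEvens, pvOdds]

theorem pvFMOdds {α : Type} : (l : List α) →
    List.filterMap (fun k => l[2*k+1]?) (List.range (l.length/2)) = pvOdds l
  | [] => by simp [pvOdds]
  | [a] => by simp [pvOdds, pvEvens]
  | a :: b :: t => by
    have ih := pvFMOdds t
    have hc : (a :: b :: t).length/2 = (t.length/2)+1 := by
      simp only [List.length_cons]; omega
    rw [hc, List.range_succ_eq_map, List.filterMap_cons, List.filterMap_map]
    have hf : ∀ x ∈ List.range (t.length/2),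
        ((fun k => (a :: b :: t)[2*k+1]?) ∘ Nat.succ) x = (fun k => t[2*k+1]?) x := by
      intro x _
      have h2 : 2*(Nat.succ x)+1 = ((2*x+1)+1)+1 := by omega
      simp [Function.comp, h2]
    rw [List.filterMap_congr hf, ih]
    simp [pvOdds, pvEvens]

-- the step-2 slices are pvEvens / pvOdds
theorem pvSliceEvens {α : Type} (l : List α) :
    PySem.List.slice? l none none 2 = some (pvEvens l) := by
  simp only [PySem.List.slice?, PySem.List.sliceIndices]
  norm_num
  have hcount : (if 0 < l.length then (((l.length:Int) + 2 - 1) / 2).toNat else 0)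
      = (l.length+1)/2 := by split <;> omega
  rw [hcount,
    List.filterMap_congr (fun x _ => by rw [show ((2 * (x:Int)).toNat) = 2*x from by omega]),
    pvFMEvens]

theorem pvSliceOdds {α : Type} (l : List α) :
    PySem.List.slice? l (some 1) none 2 = some (pvOdds l) := by
  simp only [PySem.List.slice?, PySem.List.sliceIndices]
  norm_num
  have hcount : (if 1 < l.length then
      (((l.length:Int) - min 1 (l.length:Int) + 2 - 1) / 2).toNat else 0) = l.length/2 := by
    split <;> omega
  rw [hcount]
  by_cases h2 : 2 ≤ l.length
  · rw [List.filterMap_congr (fun x _ => by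
        rw [show ((min 1 (l.length:Int) + 2 * (x:Int)).toNat) = 2*x+1 from by omega]),
      pvFMOdds]
  · rw [show l.length/2 = 0 from by omega]
    cases l with
    | nil => simp [pvOdds]
    | cons a t =>
      cases t with
      | nil => simp [pvOdds, pvEvens]
      | cons b t' => simp at h2

-- one parity class: A's all-zero dict test equals B's sorted-slice comparison
theorem pvPart (E1 E2 : List Char) :
    ((E2.foldl (fun d c => d.insert c (d.getD c 0 - 1))
       (E1.foldl (fun d c => d.insert c (d.getD c 0 + 1))
         (PySem.Dict.empty : PySem.Dict Char Int))).values.all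
      (fun count => count == 0))
    = (PySem.List.sorted E1 (fun x => x) == PySem.List.sorted E2 (fun x => x)) := by
  rw [Bool.eq_iff_iff, pvAllZero, beq_iff_eq, PySem.List.sorted_id_eq_sorted_id_iff_perm,
    List.perm_iff_count]

theorem pvMainEq (s1 s2 : String) : checkStrings s1 s2 = checkStrings_alt s1 s2 := by
  simp only [checkStrings, checkStrings_alt]
  rw [pvFoldSplitP, pvFoldSplitM]
  have he1 := (pvFilterEnum s1.toList 0).1
  have ho1 := (pvFilterEnum s1.toList 0).2
  have he2 := (pvFilterEnum s2.toList 0).1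
  have ho2 := (pvFilterEnum s2.toList 0).2
  rw [if_pos (show PySem.Int.mod 0 2 = 0 from by decide)] at he1 ho1 he2 ho2
  rw [he1, ho1, he2, ho2, pvSliceEvens, pvSliceOdds, pvSliceEvens, pvSliceOdds]
  simp only [Option.getD_some]
  rw [pvPart, pvPart]

-- ===== VERDICT (by name: the statement is the Claim_ definition above) =====
theorem checkStrings_spec : Claim_equal_checkStrings := by
  intro s1 s2 _
  show checkStrings s1 s2 = checkStrings_alt s1 s2
  exact pvMainEq s1 s2
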